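-- pv_equiv track=rewrite | github.com/thebuilderslab/projecT87 | enhanced_forensic_analyzer.py | _identify_protocol_interactions
-- ===== SOURCE A (Python) =====
-- from typing import Dict, List, Optional, Any, Tuple, Union
--
-- def _identify_protocol_interactions(decoded_logs: List[Dict]) -> Dict[str, List[str]]:
--     """Identify DeFi protocol interactions"""
--     protocols = {}
--
--     for log in decoded_logs:
--         event_name = log.get('event_name', '')
--         address = log.get('address', '').lower()
--
--         # Aave
--         if event_name in ['Borrow', 'Repay', 'Supply', 'Withdraw'] or \
--            address == '0x794a61358d6845594f94dc1db02a252b5b4814ad':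
--             if 'Aave' not in protocols:
--                 protocols['Aave'] = []
--             protocols['Aave'].append(event_name)
--
--         # ParaSwap
--         if event_name in ['Swapped', 'BoughtV3'] or \
--            address == '0xdef171fe48cf0115b1d80b88dc8eab59176fee57':
--             if 'ParaSwap' not in protocols:
--                 protocols['ParaSwap'] = []
--             protocols['ParaSwap'].append(event_name)
--
--         # Uniswap
--         if event_name in ['Swap', 'Mint', 'Burn']:
--             if 'Uniswap' not in protocols:
--                 protocols['Uniswap'] = []
--             protocols['Uniswap'].append(event_name)
--
--     return protocols
-- ===== SOURCE B (Python) =====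
-- from typing import Dict, List, Optional, Any, Tuple, Union
--
-- _AAVE_POOL = '0x794a61358d6845594f94dc1db02a252b5b4814ad'
-- _PARASWAP = '0xdef171fe48cf0115b1d80b88dc8eab59176fee57'
--
-- def _classify(event_name, address):
--     """All protocols a single log matches, in A's branch order."""
--     names = []
--     if event_name in ('Borrow', 'Repay', 'Supply', 'Withdraw') or address == _AAVE_POOL:
--         names.append('Aave')
--     if event_name in ('Swapped', 'BoughtV3') or address == _PARASWAP:
--         names.append('ParaSwap')
--     if event_name in ('Swap', 'Mint', 'Burn'):
--         names.append('Uniswap')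
--     return names
--
-- def _identify_protocol_interactions(decoded_logs: List[Dict]) -> Dict[str, List[str]]:
--     """Identify DeFi protocol interactions (flatten to hits, then group)."""
--     # stage 1: flat list of (protocol, event_name) hits
--     hits = [(p, log.get('event_name', ''))
--             for log in decoded_logs
--             for p in _classify(log.get('event_name', ''), log.get('address', '').lower())]
--     # stage 2: group by protocol, keys in first-occurrence order
--     order = list(dict.fromkeys(p for p, _ in hits))
--     return {p: [e for q, e in hits if q == p] for p in order}
-- ===== Notes on version B (the rewrite author's own statement) =====
-- stated objective: alternative
-- what changed: A classifies and mutates a result dict in a single pass with three inlined if-blocks and manual key initialisation; B decomposes into staged passes: a classifier flattens all logs into one flat (protocol, event) hit list, then a separate grouping stage derives the key order by first occurrence (dict.fromkeys) and builds each protocol's event list by filtering the hit list.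
import Mathlib
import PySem

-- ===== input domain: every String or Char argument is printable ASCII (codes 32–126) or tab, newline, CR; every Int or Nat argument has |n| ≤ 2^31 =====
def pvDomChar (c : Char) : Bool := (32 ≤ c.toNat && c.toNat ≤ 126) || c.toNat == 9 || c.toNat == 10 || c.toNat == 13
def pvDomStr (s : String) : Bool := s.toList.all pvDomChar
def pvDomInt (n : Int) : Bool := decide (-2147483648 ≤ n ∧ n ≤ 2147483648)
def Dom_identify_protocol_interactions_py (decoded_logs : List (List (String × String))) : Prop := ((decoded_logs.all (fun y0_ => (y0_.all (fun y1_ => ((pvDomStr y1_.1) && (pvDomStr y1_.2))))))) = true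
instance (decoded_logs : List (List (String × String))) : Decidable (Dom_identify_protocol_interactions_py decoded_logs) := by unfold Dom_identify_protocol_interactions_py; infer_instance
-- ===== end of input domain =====

-- B replaces A's single pass that mutates a dict with three per-protocol if-blocks by
-- two staged passes: flatten all logs to a flat (protocol, event) hit list, then group
-- it by protocol in first-occurrence key order (idiomatic; same behaviour, same cost).

-- ===== PORT A =====
-- log.get(k, '') on the input association-list dict (first match, per the type convention)
def pvLogGet (log : List (String × String)) (k : String) : String :=
  (List.lookup k log).getD ""

-- the body of A's 'for log in decoded_logs' loop
def pvStepA (protocols : PySem.Dict String (List String)) (log : List (String × String)) :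
    PySem.Dict String (List String) :=
  let event_name := pvLogGet log "event_name"
  let address := PySem.Str.lower (pvLogGet log "address")
  -- Aave
  let protocols :=
    if ["Borrow", "Repay", "Supply", "Withdraw"].contains event_name
        || address == "0x794a61358d6845594f94dc1db02a252b5b4814ad" then
      let protocols :=
        if !(protocols.contains "Aave") then protocols.insert "Aave" ([] : List String)
        else protocols
      protocols.modify "Aave" [] (fun v => v ++ [event_name])
    else protocols
  -- ParaSwap
  let protocols :=
    if ["Swapped", "BoughtV3"].contains event_name
        || address == "0xdef171fe48cf0115b1d80b88dc8eab59176fee57" then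
      let protocols :=
        if !(protocols.contains "ParaSwap") then protocols.insert "ParaSwap" ([] : List String)
        else protocols
      protocols.modify "ParaSwap" [] (fun v => v ++ [event_name])
    else protocols
  -- Uniswap
  if ["Swap", "Mint", "Burn"].contains event_name then
    let protocols :=
      if !(protocols.contains "Uniswap") then protocols.insert "Uniswap" ([] : List String)
      else protocols
    protocols.modify "Uniswap" [] (fun v => v ++ [event_name])
  else protocols

def identify_protocol_interactions_py (decoded_logs : List (List (String × String))) : List (String × List String) :=
  (decoded_logs.foldl pvStepA (PySem.Dict.empty : PySem.Dict String (List String))).items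

-- ===== PORT B =====
-- _classify: all protocols a single log matches, in A's branch order
def pvClassify (event_name address : String) : List String :=
  (if ["Borrow", "Repay", "Supply", "Withdraw"].contains event_name
      || address == "0x794a61358d6845594f94dc1db02a252b5b4814ad" then ["Aave"] else [])
  ++ (if ["Swapped", "BoughtV3"].contains event_name
      || address == "0xdef171fe48cf0115b1d80b88dc8eab59176fee57" then ["ParaSwap"] else [])
  ++ (if ["Swap", "Mint", "Burn"].contains event_name then ["Uniswap"] else [])

-- stage 1: the flat (protocol, event_name) hit list
def pvHits (decoded_logs : List (List (String × String))) : List (String × String) :=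
  decoded_logs.flatMap (fun log =>
    (pvClassify (pvLogGet log "event_name") (PySem.Str.lower (pvLogGet log "address"))).map
      (fun p => (p, pvLogGet log "event_name")))

-- stage 2: group the hits by protocol, keys in first-occurrence order
def identify_protocol_interactions_py_alt (decoded_logs : List (List (String × String))) : List (String × List String) :=
  let hits := pvHits decoded_logs
  let order := PySem.List.dedup (hits.map (·.1))
  order.map (fun p => (p, (hits.filter (fun qe => qe.1 == p)).map (·.2)))

-- ===== PRECONDITION & SPEC =====
def Spec_identify_protocol_interactions_py (decoded_logs : List (List (String × String))) (out : List (String × List String)) : Prop := out = identify_protocol_interactions_py_alt decoded_logs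
instance (decoded_logs : List (List (String × String))) (out : List (String × List String)) : Decidable (Spec_identify_protocol_interactions_py decoded_logs out) := by unfold Spec_identify_protocol_interactions_py; infer_instance

-- ===== CLAIM =====
def Claim_equal_identify_protocol_interactions_py : Prop := ∀ (decoded_logs : List (List (String × String))), Dom_identify_protocol_interactions_py decoded_logs → Spec_identify_protocol_interactions_py decoded_logs (identify_protocol_interactions_py decoded_logs)

-- ===== LEMMAS AND PROOFS =====

-- A's "if key missing insert [] then append" is one modify-append step
theorem pv_insert_modify (d : PySem.Dict String (List String)) (k : String) (f : List String → List String) :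
    (if !(d.contains k) then d.insert k ([] : List String) else d).modify k [] f
      = d.modify k [] f := by
  by_cases h : d.contains k = true
  · simp [h]
  · simp only [Bool.not_eq_true] at h
    simp [h, PySem.Dict.modify, PySem.Dict.getD_insert_self, PySem.Dict.insert_insert_self,
      PySem.Dict.getD_of_not_contains d ([] : List String) h]

-- one of A's conditional blocks, written as a fold over a 0/1-element hit list
theorem pv_block (d : PySem.Dict String (List String)) (c : Bool) (k e : String) :
    List.foldl (fun d qe => PySem.Dict.modify d qe.1 [] (fun v => v ++ [qe.2])) d
        (if c then [(k, e)] else [])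
      = (if c then ((if !(d.contains k) then d.insert k ([] : List String) else d).modify k []
          (fun v => v ++ [e])) else d) := by
  cases c
  · rfl
  · exact (pv_insert_modify d k (fun v => v ++ [e])).symm

-- A's per-log body is a fold of modify-append over that log's classified hit pairs
theorem pv_stepA_eq_foldl (d : PySem.Dict String (List String)) (log : List (String × String)) :
    pvStepA d log
      = ((pvClassify (pvLogGet log "event_name") (PySem.Str.lower (pvLogGet log "address"))).map
          (fun p => (p, pvLogGet log "event_name"))).foldl
          (fun d qe => PySem.Dict.modify d qe.1 [] (fun v => v ++ [qe.2])) d := by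
  simp only [pvStepA, pvClassify, List.map_append, List.foldl_append,
    apply_ite (List.map (fun p => (p, pvLogGet log "event_name"))), List.map_cons, List.map_nil,
    pv_block]

-- A's whole loop is a fold of modify-append over the flat hit list
theorem pv_foldA_eq (decoded_logs : List (List (String × String))) :
    decoded_logs.foldl pvStepA (PySem.Dict.empty : PySem.Dict String (List String))
      = (pvHits decoded_logs).foldl
          (fun d qe => PySem.Dict.modify d qe.1 [] (fun v => v ++ [qe.2])) PySem.Dict.empty := by
  rw [pvHits, List.foldl_flatMap]
  rw [funext fun d => funext fun log => pv_stepA_eq_foldl d log]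

-- ===== VERDICT =====
theorem identify_protocol_interactions_py_spec : Claim_equal_identify_protocol_interactions_py := by
  intro decoded_logs _
  unfold Spec_identify_protocol_interactions_py
  unfold identify_protocol_interactions_py identify_protocol_interactions_py_alt
  rw [pv_foldA_eq]
  have hnd : ((pvHits decoded_logs).foldl
      (fun d qe => d.modify qe.1 [] (fun v => v ++ [qe.2]))
      (PySem.Dict.empty : PySem.Dict String (List String))).keys.Nodup :=
    PySem.Dict.nodup_keys_foldl_modify_key _ _ _ _ _ PySem.Dict.nodup_keys_empty
  rw [PySem.Dict.items_eq_map_keys _ hnd []]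
  rw [PySem.Dict.keys_foldl_modify_key]
  simp [PySem.Dict.getD_foldl_modify_append, PySem.Set.update, PySem.Dict.keys_empty,
    PySem.List.dedup_eq_ofList, PySem.Set.ofList]
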